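-- pv_equiv track=rewrite | github.com/ArmenAsriev/TZ-for-Perfomans-lub | task1/task1.py | circular_path
-- ===== SOURCE A (Python) =====
-- def circular_path(n, m):
--     result = []
--     i = 1
--     while True:
--         result.append(i)
--         i = 1 + (i + m - 2) % n
--         if i == 1:
--             break
--     return result
-- ===== SOURCE B (Python) =====
-- def circular_path(n, m):
--     step = (m - 1) % n
--     g, x = abs(n), abs(step)
--     while x:
--         g, x = x, g % x
--     length = abs(n) // g
--     return [1 + (k * step) % n for k in range(length)]
-- ===== Notes on version B (the rewrite author's own statement) =====
-- stated objective: alternative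
-- what changed: A walks the circle with an open-ended while-True loop, appending each position until it returns to 1; B computes the cycle length |n|/gcd(|n|,|step|) with Euclid's algorithm and emits each position by the closed form 1 + (k*step) % n over a fixed-length range.
import Mathlib
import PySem

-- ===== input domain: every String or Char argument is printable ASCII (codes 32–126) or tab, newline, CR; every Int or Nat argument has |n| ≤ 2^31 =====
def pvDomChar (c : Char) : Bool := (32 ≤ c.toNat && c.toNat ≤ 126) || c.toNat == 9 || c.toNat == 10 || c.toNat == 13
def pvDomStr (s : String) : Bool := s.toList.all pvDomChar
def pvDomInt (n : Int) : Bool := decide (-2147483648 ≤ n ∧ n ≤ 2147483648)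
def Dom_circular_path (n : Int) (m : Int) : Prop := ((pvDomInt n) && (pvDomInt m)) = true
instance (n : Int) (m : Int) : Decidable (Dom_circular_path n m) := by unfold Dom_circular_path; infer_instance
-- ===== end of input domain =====

-- B replaces A's open-ended walk around the circle by a closed form: it computes the
-- cycle length |n| / gcd(|n|, |step|) with Euclid's algorithm and emits each visited
-- position as 1 + (k*step) % n directly (objective: alternative algorithm, same cost).

-- ===== PORT A =====
-- A's `while True` walk; the fuel n.natAbs is an upper bound on the number of
-- iterations (proved in the lemmas below: the loop returns to 1 after at most |n| steps);
-- under Pre_ the fuel is never exhausted, so this is a step-for-step transliteration.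
def circularLoopA (n m : Int) : Nat → Int → List Int
  | 0, _ => []
  | f + 1, i =>
      let i' := 1 + PySem.Int.mod (i + m - 2) n
      if i' = 1 then [i] else i :: circularLoopA n m f i'

def circular_path (n : Int) (m : Int) : List Int :=
  circularLoopA n m n.natAbs 1

-- ===== PORT B =====
-- Source B's hand-written Euclid loop `while x: g, x = x, g % x`
def euclidB (g : Nat) : Nat → Nat
  | 0 => g
  | x + 1 => euclidB (x + 1) (g % (x + 1))
decreasing_by exact Nat.mod_lt _ (Nat.succ_pos x)

def circular_path_alt (n : Int) (m : Int) : List Int :=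
  let step := PySem.Int.mod (m - 1) n
  let g := euclidB n.natAbs step.natAbs
  let length := n.natAbs / g
  (PySem.List.pyRange 0 (length : Int) 1).map (fun k => 1 + PySem.Int.mod (k * step) n)

-- ===== PRECONDITION & SPEC =====
-- Pre_ excludes exactly n = 0, where Python's `% n` raises ZeroDivisionError in both A and B.
def Pre_circular_path (n : Int) (m : Int) : Prop := n ≠ 0
instance (n : Int) (m : Int) : Decidable (Pre_circular_path n m) := by unfold Pre_circular_path; infer_instance
def pvWitness_circular_path : Int × Int := (5, 3)

def Spec_circular_path (n : Int) (m : Int) (out : List Int) : Prop := out = circular_path_alt n m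
instance (n : Int) (m : Int) (out : List Int) : Decidable (Spec_circular_path n m out) := by unfold Spec_circular_path; infer_instance

-- ===== CLAIM (what is proved, stated in full; the proofs are below) =====
def Claim_equal_circular_path : Prop := ∀ (n : Int) (m : Int), Dom_circular_path n m → Pre_circular_path n m → Spec_circular_path n m (circular_path n m)

-- ===== LEMMAS AND PROOFS =====

-- n divides (x % n) - x
theorem pv_mod_sub_dvd (x n : Int) : n ∣ (PySem.Int.mod x n - x) := by
  have h := PySem.Int.floordiv_mul_add_mod x n
  exact ⟨-(PySem.Int.floordiv x n), by linarith⟩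

-- Python's floor mod identifies integers congruent mod n
theorem pv_mod_congr {n : Int} (hn : n ≠ 0) {a b : Int} (h : n ∣ a - b) :
    PySem.Int.mod a n = PySem.Int.mod b n := by
  have hd : n ∣ (PySem.Int.mod a n - PySem.Int.mod b n) := by
    have h1 := pv_mod_sub_dvd a n
    have h2 := pv_mod_sub_dvd b n
    have : PySem.Int.mod a n - PySem.Int.mod b n
        = (PySem.Int.mod a n - a) - (PySem.Int.mod b n - b) + (a - b) := by ring
    rw [this]
    exact dvd_add (dvd_sub h1 h2) h
  have habs : |PySem.Int.mod a n - PySem.Int.mod b n| < |n| := by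
    rcases lt_or_gt_of_ne hn with hneg | hpos
    · have ha := PySem.Int.mod_neg_bounds a hneg
      have hb := PySem.Int.mod_neg_bounds b hneg
      rw [abs_of_neg hneg]; rw [abs_lt]; omega
    · have ha1 := PySem.Int.mod_nonneg a hpos
      have ha2 := PySem.Int.mod_lt a hpos
      have hb1 := PySem.Int.mod_nonneg b hpos
      have hb2 := PySem.Int.mod_lt b hpos
      rw [abs_of_pos hpos]; rw [abs_lt]; omega
  have := Int.eq_zero_of_abs_lt_dvd ((abs_dvd n _).mpr hd) habs
  omega

-- the position after k steps of A's walk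
def pvPos (n m : Int) (k : Nat) : Int :=
  1 + PySem.Int.mod ((k : Int) * PySem.Int.mod (m - 1) n) n

theorem pv_pos_zero (n m : Int) : pvPos n m 0 = 1 := by
  have : PySem.Int.mod 0 n = 0 := (PySem.Int.mod_eq_zero_iff_dvd 0 n).mpr ⟨0, by ring⟩
  simp [pvPos, this]

-- one loop-body update carries pvPos k to pvPos (k+1)
theorem pv_step {n : Int} (hn : n ≠ 0) (m : Int) (k : Nat) :
    1 + PySem.Int.mod (pvPos n m k + m - 2) n = pvPos n m (k + 1) := by
  unfold pvPos
  congr 1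
  apply pv_mod_congr hn
  push_cast
  have h1 := pv_mod_sub_dvd ((k : Int) * PySem.Int.mod (m - 1) n) n
  have h2 := pv_mod_sub_dvd (m - 1) n
  have : 1 + PySem.Int.mod ((k : Int) * PySem.Int.mod (m - 1) n) n + m - 2
      - ((k : Int) + 1) * PySem.Int.mod (m - 1) n
      = (PySem.Int.mod ((k : Int) * PySem.Int.mod (m - 1) n) n
          - (k : Int) * PySem.Int.mod (m - 1) n)
        - (PySem.Int.mod (m - 1) n - (m - 1)) := by ring
  rw [this]
  exact dvd_sub h1 h2

-- the walk returns to 1 exactly at multiples of L = |n| / gcd(|n|, |step|)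
theorem pv_dvd_iff {n : Int} (hn : n ≠ 0) (m : Int) (j : Nat) :
    n ∣ ((j : Int) * PySem.Int.mod (m - 1) n)
      ↔ (n.natAbs / Nat.gcd n.natAbs (PySem.Int.mod (m - 1) n).natAbs) ∣ j := by
  set s := PySem.Int.mod (m - 1) n with hs
  set N := n.natAbs with hN
  set S := s.natAbs with hS
  set g := Nat.gcd N S with hg
  have hN0 : 0 < N := Int.natAbs_pos.mpr hn
  have hg0 : 0 < g := Nat.gcd_pos_of_pos_left S hN0
  obtain ⟨N', hN'⟩ : g ∣ N := Nat.gcd_dvd_left N S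
  obtain ⟨S', hS'⟩ : g ∣ S := Nat.gcd_dvd_right N S
  have hNdiv : N / g = N' := by rw [hN']; exact Nat.mul_div_cancel_left _ hg0
  have hSdiv : S / g = S' := by rw [hS']; exact Nat.mul_div_cancel_left _ hg0
  have key : n ∣ ((j : Int) * s) ↔ N ∣ j * S := by
    rw [← Int.natAbs_dvd, ← Int.dvd_natAbs, Int.natAbs_mul, Int.natAbs_natCast,
      Int.natCast_dvd_natCast]
  rw [key, hNdiv]
  constructor
  · intro h
    have hcop : Nat.Coprime N' S' := by
      have := Nat.coprime_div_gcd_div_gcd (m := N) (n := S) hg0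
      rwa [hNdiv, hSdiv] at this
    have h2 : g * N' ∣ g * (j * S') := by
      rw [← hN']
      have : j * S = g * (j * S') := by rw [hS']; ring
      rwa [this] at h
    have h3 : N' ∣ j * S' := (Nat.mul_dvd_mul_iff_left hg0).mp h2
    exact hcop.dvd_of_dvd_mul_right h3
  · rintro ⟨t, ht⟩
    subst ht
    exact ⟨t * S', by rw [hN', hS']; ring⟩

-- A's break test `i == 1` fires exactly when L divides the step count
theorem pv_pos_one_iff {n : Int} (hn : n ≠ 0) (m : Int) (j : Nat) :
    pvPos n m j = 1
      ↔ (n.natAbs / Nat.gcd n.natAbs (PySem.Int.mod (m - 1) n).natAbs) ∣ j := by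
  have hiff := PySem.Int.mod_eq_zero_iff_dvd ((j : Int) * PySem.Int.mod (m - 1) n) n
  have hdvd := pv_dvd_iff hn m j
  unfold pvPos
  constructor
  · intro h
    exact hdvd.mp (hiff.mp (by omega))
  · intro h
    have := hiff.mpr (hdvd.mpr h)
    omega

-- unrolled characterisation of A's loop
theorem pv_loopA_eq (n m : Int) (hn : n ≠ 0) :
    ∀ (f k : Nat),
      k < n.natAbs / Nat.gcd n.natAbs (PySem.Int.mod (m - 1) n).natAbs →
      n.natAbs / Nat.gcd n.natAbs (PySem.Int.mod (m - 1) n).natAbs - k ≤ f →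
      circularLoopA n m f (pvPos n m k)
        = (List.range (n.natAbs / Nat.gcd n.natAbs (PySem.Int.mod (m - 1) n).natAbs - k)).map
            (fun j => pvPos n m (k + j)) := by
  set L := n.natAbs / Nat.gcd n.natAbs (PySem.Int.mod (m - 1) n).natAbs with hL
  intro f
  induction f with
  | zero => intro k hk hf; omega
  | succ f ih =>
    intro k hk hf
    have hstep := pv_step hn m k
    show (if 1 + PySem.Int.mod (pvPos n m k + m - 2) n = 1 then [pvPos n m k]
        else pvPos n m k :: circularLoopA n m f (1 + PySem.Int.mod (pvPos n m k + m - 2) n))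
      = _
    rcases Nat.lt_or_ge (k + 1) L with hlt | hge
    · -- not yet back to 1: recurse
      have hnd : ¬ L ∣ (k + 1) := fun hdvd =>
        absurd (Nat.le_of_dvd (Nat.succ_pos k) hdvd) (by omega)
      have hne : ¬ (1 + PySem.Int.mod (pvPos n m k + m - 2) n = 1) := by
        rw [hstep, pv_pos_one_iff hn m (k + 1)]; exact hnd
      rw [if_neg hne, hstep, ih (k + 1) hlt (by omega)]
      rw [show L - k = (L - (k + 1)) + 1 by omega, List.range_succ_eq_map,
        List.map_cons, List.map_map]
      congr 1
      apply List.map_congr_left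
      intro j hj
      simp only [Function.comp]
      congr 1
      omega
    · -- k + 1 = L: break
      have hkL : k + 1 = L := by omega
      have hpos : pvPos n m (k + 1) = 1 :=
        (pv_pos_one_iff hn m (k + 1)).mpr (by rw [hkL])
      rw [if_pos (by rw [hstep, hpos])]
      rw [show L - k = 1 by omega]
      simp

-- Euclid's loop computes gcd
theorem pv_euclid_gcd : ∀ (x g : Nat), euclidB g x = Nat.gcd g x := by
  intro x
  induction x using Nat.strong_induction_on with
  | _ x ih =>
    intro g
    match x with
    | 0 => simp [euclidB]
    | y + 1 =>
      rw [euclidB, ih (g % (y + 1)) (Nat.mod_lt _ (Nat.succ_pos y)) (y + 1)]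
      rw [Nat.gcd_comm (y + 1), ← Nat.gcd_rec, Nat.gcd_comm]

-- ===== VERDICT (by name: the statement is the Claim_ definition above) =====
theorem circular_path_spec : Claim_equal_circular_path := by
  intro n m _ hn
  unfold Spec_circular_path
  have hN0 : 0 < n.natAbs := Int.natAbs_pos.mpr hn
  have hg0 : 0 < Nat.gcd n.natAbs (PySem.Int.mod (m - 1) n).natAbs :=
    Nat.gcd_pos_of_pos_left _ hN0
  have hL1 : 0 < n.natAbs / Nat.gcd n.natAbs (PySem.Int.mod (m - 1) n).natAbs :=
    Nat.div_pos (Nat.le_of_dvd hN0 (Nat.gcd_dvd_left _ _)) hg0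
  have hLN : n.natAbs / Nat.gcd n.natAbs (PySem.Int.mod (m - 1) n).natAbs ≤ n.natAbs :=
    Nat.div_le_self _ _
  have hA : circular_path n m
      = (List.range (n.natAbs / Nat.gcd n.natAbs (PySem.Int.mod (m - 1) n).natAbs)).map
          (pvPos n m) := by
    unfold circular_path
    conv_lhs => rw [show (1 : Int) = pvPos n m 0 from (pv_pos_zero n m).symm]
    rw [pv_loopA_eq n m hn n.natAbs 0 (by omega) (by omega)]
    simp
  rw [hA]
  simp only [circular_path_alt, pv_euclid_gcd, PySem.List.pyRange_zero_nat, List.map_map]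
  apply List.map_congr_left
  intro j hj
  simp [pvPos, Function.comp]
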